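-- pv_equiv track=rewrite | github.com/MartyTiemFlyer/V_simplex | star.py | add_artificial_vars
-- ===== SOURCE A (Python) =====
-- def add_artificial_vars(A, b, signs, var_names, basis):
--     """Добавляем искусственные переменные для Phase I"""
--     m = len(A)
--     n = len(A[0])
--     A_new = [row[:] for row in A]
--     var_names_new = var_names[:]
--     artificial_vars = []
--
--     for i in range(m):
--         if signs[i] in (">=", "="):
--             col = [0]*m
--             col[i] = 1
--             for r in range(m):
--                 A_new[r].append(col[r])
--             var_names_new.append(f"v{len(artificial_vars)+1}")
--             artificial_vars.append(len(var_names_new)-1)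
--             basis.append(var_names_new[-1])
--
--     return A_new, b, var_names_new, basis, artificial_vars
-- ===== SOURCE B (Python) =====
-- def add_artificial_vars(A, b, signs, var_names, basis):
--     """Добавляем искусственные переменные для Phase I"""
--     # total number of artificial variables, known up front
--     k = sum(1 for s in signs[:len(A)] if s in (">=", "="))
--     A_new = []
--     p = 0  # artificial columns already placed in earlier rows
--     for row, sign in zip(A, signs):
--         if sign in (">=", "="):
--             A_new.append(row + [0] * p + [1] + [0] * (k - p - 1))
--             p += 1
--         else:
--             A_new.append(row + [0] * k)
--     new_names = ["v%d" % (j + 1) for j in range(k)]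
--     basis.extend(new_names)
--     return A_new, b, var_names + new_names, basis, list(range(len(var_names), len(var_names) + k))
-- ===== Notes on version B (the rewrite author's own statement) =====
-- stated objective: alternative
-- what changed: B never materialises any column or row-index list: it counts the artificial variables k up front, then builds each new row in one pass by gluing an arithmetically-sized zero/one block (p zeros, a 1, k-p-1 zeros, with p a running prefix counter) onto the row, instead of A's outer loop that appends a freshly built unit column entry-by-entry to every row of the matrix; basis is still extended in place.
import Mathlib
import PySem

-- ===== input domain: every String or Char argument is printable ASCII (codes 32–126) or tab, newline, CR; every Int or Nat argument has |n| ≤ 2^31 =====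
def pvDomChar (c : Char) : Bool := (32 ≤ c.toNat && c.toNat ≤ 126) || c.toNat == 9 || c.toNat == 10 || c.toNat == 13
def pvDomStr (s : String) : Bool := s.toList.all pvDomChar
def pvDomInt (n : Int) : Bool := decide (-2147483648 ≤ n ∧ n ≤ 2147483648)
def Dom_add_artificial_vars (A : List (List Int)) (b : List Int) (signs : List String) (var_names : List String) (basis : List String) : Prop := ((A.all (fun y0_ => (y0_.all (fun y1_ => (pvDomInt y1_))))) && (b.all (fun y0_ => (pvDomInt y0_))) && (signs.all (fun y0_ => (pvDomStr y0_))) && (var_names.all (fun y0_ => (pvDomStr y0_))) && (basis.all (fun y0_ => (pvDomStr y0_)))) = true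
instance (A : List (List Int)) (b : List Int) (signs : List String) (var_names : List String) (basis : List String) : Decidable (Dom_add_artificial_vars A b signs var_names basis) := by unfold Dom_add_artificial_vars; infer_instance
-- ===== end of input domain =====

-- B counts the artificial variables up front and builds each new row in one pass from an
-- arithmetically-sized zero/one block (prefix counter), instead of A's column-at-a-time loop
-- over the whole matrix (objective: alternative decomposition, same cost).
-- Both A and B mutate the passed basis in place (append the new names); the equivalence
-- proved here is about the returned tuple.


-- ===== PORT A =====
-- the body of A's "for i in range(m)" loop; state = (A_new, var_names_new, artificial_vars, basis)
def pvStepA (m : Int) (signs : List String)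
    (s : List (List Int) × List String × List Int × List String) (i : Int) :
    List (List Int) × List String × List Int × List String :=
  if PySem.List.pyGetD signs i "" = ">=" ∨ PySem.List.pyGetD signs i "" = "=" then
    -- col = [0]*m; col[i] = 1
    let col : List Int := PySem.List.pySetD (List.replicate m.toNat 0) i 1
    -- "for r in range(m): A_new[r].append(col[r])" — A_new and col both have length m,
    -- so appending col[r] to every row r is exactly this zipWith
    let A_new := List.zipWith (fun row c => row ++ [c]) s.1 col
    let vn := s.2.1 ++ ["v" ++ PySem.Int.toStr ((s.2.2.1.length : Int) + 1)]
    let art := s.2.2.1 ++ [((vn.length : Int) - 1)]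
    let bas := s.2.2.2 ++ [PySem.List.pyGetD vn (-1) ""]   -- basis.append(var_names_new[-1])
    (A_new, vn, art, bas)
  else s

def add_artificial_vars (A : List (List Int)) (b : List Int) (signs : List String) (var_names : List String) (basis : List String) : List (List Int) × List Int × List String × List String × List Int :=
  let m : Int := A.length
  let st := (PySem.List.pyRange 0 m 1).foldl (pvStepA m signs)
      (A.map (fun row => row), var_names, ([] : List Int), basis)
  (st.1, b, st.2.1, st.2.2.2, st.2.2.1)

-- ===== PORT B =====
-- the body of B's "for row, sign in zip(A, signs)" loop; state = (A_new, p)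
def pvStepB (k : Int) (st : List (List Int) × Int) (pr : List Int × String) :
    List (List Int) × Int :=
  if pr.2 = ">=" ∨ pr.2 = "=" then
    (st.1 ++ [pr.1 ++ List.replicate st.2.toNat 0 ++ (1 : Int) :: List.replicate (k - st.2 - 1).toNat 0],
     st.2 + 1)
  else
    (st.1 ++ [pr.1 ++ List.replicate k.toNat 0], st.2)

def add_artificial_vars_alt (A : List (List Int)) (b : List Int) (signs : List String) (var_names : List String) (basis : List String) : List (List Int) × List Int × List String × List String × List Int :=
  -- k = sum(1 for s in signs[:len(A)] if s in (">=", "="))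
  let k : Int := (PySem.List.slice signs none (some (A.length : Int))).foldl
      (fun acc s => if s = ">=" ∨ s = "=" then acc + 1 else acc) 0
  let st := (List.zip A signs).foldl (pvStepB k) ([], 0)
  let new_names := (PySem.List.pyRange 0 k 1).map (fun j => "v" ++ PySem.Int.toStr (j + 1))
  (st.1, b, var_names ++ new_names, basis ++ new_names,
   PySem.List.pyRange (var_names.length : Int) ((var_names.length : Int) + k) 1)

-- ===== PRECONDITION & SPEC =====
-- Pre_ excludes exactly the inputs on which the Python A raises IndexError:
-- A = [] (it reads A[0]) and signs shorter than A (it reads signs[i] for every row i).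
def Pre_add_artificial_vars (A : List (List Int)) (b : List Int) (signs : List String) (var_names : List String) (basis : List String) : Prop :=
  A ≠ [] ∧ A.length ≤ signs.length
instance (A : List (List Int)) (b : List Int) (signs : List String) (var_names : List String) (basis : List String) : Decidable (Pre_add_artificial_vars A b signs var_names basis) := by unfold Pre_add_artificial_vars; infer_instance
def pvWitness_add_artificial_vars : List (List Int) × List Int × List String × List String × List String :=
  ([[1, 2], [3, 4]], [5, 6], [">=", "<="], ["x1", "x2"], ["s1"])

def Spec_add_artificial_vars (A : List (List Int)) (b : List Int) (signs : List String) (var_names : List String) (basis : List String) (out : List (List Int) × List Int × List String × List String × List Int) : Prop := out = add_artificial_vars_alt A b signs var_names basis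
instance (A : List (List Int)) (b : List Int) (signs : List String) (var_names : List String) (basis : List String) (out : List (List Int) × List Int × List String × List String × List Int) : Decidable (Spec_add_artificial_vars A b signs var_names basis out) := by unfold Spec_add_artificial_vars; infer_instance

-- ===== CLAIM (what is proved, stated in full; the proofs are below) =====
def Claim_equal_add_artificial_vars : Prop := ∀ (A : List (List Int)) (b : List Int) (signs : List String) (var_names : List String) (basis : List String), Dom_add_artificial_vars A b signs var_names basis → Pre_add_artificial_vars A b signs var_names basis → Spec_add_artificial_vars A b signs var_names basis (add_artificial_vars A b signs var_names basis)
-- ===== LEMMAS AND PROOFS =====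

-- the loop predicate "signs[i] in ('>=', '=')" as a Bool
def pvP (signs : List String) (i : Int) : Bool :=
  decide (PySem.List.pyGetD signs i "" = ">=" ∨ PySem.List.pyGetD signs i "" = "=")

-- number of qualifying rows among 0 .. r-1
def pvCnt (signs : List String) (r : Nat) : Nat :=
  ((PySem.List.pyRange 0 (r : Int) 1).filter (pvP signs)).length

-- the closed form of A's loop state after processing rows 0 .. k-1
def pvState (A : List (List Int)) (signs var_names basis : List String) (k : Nat) :
    List (List Int) × List String × List Int × List String :=
  let q := (PySem.List.pyRange 0 (k : Int) 1).filter (pvP signs)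
  let nm := (PySem.List.pyRange 0 (q.length : Int) 1).map (fun j => "v" ++ PySem.Int.toStr (j + 1))
  ((PySem.List.pyRange 0 (A.length : Int) 1).map
      (fun r => PySem.List.pyGetD A r [] ++ q.map (fun i => if i = r then (1 : Int) else 0)),
   var_names ++ nm,
   (PySem.List.pyRange 0 (q.length : Int) 1).map (fun j => (var_names.length : Int) + j),
   basis ++ nm)

lemma pvZipSelf {α γ : Type} (f : α → α → γ) (l : List α) :
    List.zipWith f l l = l.map (fun x => f x x) := by
  induction l with
  | nil => rfl
  | cons x xs ih => simp [List.zipWith]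

lemma pvCol_eq (m : Nat) (i : Int) (h0 : 0 ≤ i) :
    PySem.List.pySetD (List.replicate m (0 : Int)) i 1
      = (PySem.List.pyRange 0 (m : Int) 1).map (fun r => if i = r then (1 : Int) else 0) := by
  rw [PySem.List.pySetD_of_nonneg _ 1 h0, PySem.List.pyRange_one]
  apply List.ext_getElem
  · simp
  · intro n hn1 hn2
    simp at hn1 hn2 ⊢
    rw [List.getElem_set]
    split_ifs with h1 h2 h3 <;> simp_all <;> omega

lemma pvInv (A : List (List Int)) (signs var_names basis : List String) (k : Nat) :
    (PySem.List.pyRange 0 (k : Int) 1).foldl (pvStepA (A.length : Int) signs)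
        (A.map (fun row => row), var_names, ([] : List Int), basis)
      = pvState A signs var_names basis k := by
  induction k with
  | zero =>
    unfold pvState
    simp only [Nat.cast_zero, PySem.List.pyRange_one_eq_nil (le_refl (0 : Int)),
      List.foldl_nil, List.filter_nil, List.length_nil, List.map_nil, List.append_nil,
      Prod.mk.injEq]
    refine ⟨?_, trivial⟩
    rw [List.map_id']
    exact (PySem.List.map_pyGetD_pyRange_zero' A []).symm
  | succ k ih =>
    have hcast : ((k + 1 : Nat) : Int) = (k : Int) + 1 := by push_cast; ring
    rw [hcast, PySem.List.pyRange_one_succ_right (by omega), List.foldl_append,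
        ih, List.foldl_cons, List.foldl_nil]
    by_cases h : PySem.List.pyGetD signs (k : Int) "" = ">=" ∨ PySem.List.pyGetD signs (k : Int) "" = "="
    · have hb : pvP signs (k : Int) = true := by unfold pvP; exact decide_eq_true h
      have hq : (PySem.List.pyRange 0 ((k : Int) + 1) 1).filter (pvP signs)
          = (PySem.List.pyRange 0 (k : Int) 1).filter (pvP signs) ++ [(k : Int)] := by
        rw [PySem.List.pyRange_one_succ_right (by omega), List.filter_append]
        simp [hb]
      unfold pvState
      simp only [hcast, hq]
      rw [pvStepA, if_pos h]
      set q := (PySem.List.pyRange 0 (k : Int) 1).filter (pvP signs) with hqdef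
      have hlen : ∀ (f : Int → String),
          ((PySem.List.pyRange 0 (q.length : Int) 1).map f).length = q.length := by
        intro f; simp [PySem.List.length_pyRange_one]
      have hlenI : ((PySem.List.pyRange 0 (q.length : Int) 1).map
          (fun j => (var_names.length : Int) + j)).length = q.length := by
        simp [PySem.List.length_pyRange_one]
      have hql : ((q ++ [(k : Int)]).length : Int) = (q.length : Int) + 1 := by
        simp
      simp only [Prod.mk.injEq]
      refine ⟨?_, ?_, ?_, ?_⟩
      · -- A_new component
        rw [show ((A.length : Int)).toNat = A.length by simp,
            pvCol_eq A.length (k : Int) (by omega),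
            List.zipWith_map, pvZipSelf]
        simp [List.map_append, List.append_assoc]
      · -- var_names component
        rw [hlenI, hql, PySem.List.pyRange_one_succ_right (by omega)]
        simp [List.map_append, List.append_assoc]
      · -- artificial_vars component
        rw [hql, PySem.List.pyRange_one_succ_right (by omega)]
        simp only [List.map_append, List.map_cons, List.map_nil]
        congr 2
        simp [hlen, hlenI]
        push_cast
        ring
      · -- basis component
        rw [PySem.List.pyGetD_neg_one_append_singleton, hlenI, hql,
            PySem.List.pyRange_one_succ_right (by omega)]
        simp [List.map_append, List.append_assoc]
    · have hb : pvP signs (k : Int) = false := by unfold pvP; exact decide_eq_false h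
      have hq : (PySem.List.pyRange 0 ((k : Int) + 1) 1).filter (pvP signs)
          = (PySem.List.pyRange 0 (k : Int) 1).filter (pvP signs) := by
        rw [PySem.List.pyRange_one_succ_right (by omega), List.filter_append]
        simp [hb]
      unfold pvState
      simp only [hcast, hq]
      rw [pvStepA, if_neg h]

-- ===== B-side lemmas =====

-- map to all-zeros is a replicate
lemma pvMapZero (f : Int → Int) (l : List Int) (h : ∀ x ∈ l, f x = 0) :
    l.map f = List.replicate l.length 0 := by
  induction l with
  | nil => rfl
  | cons x xs ih =>
    simp only [List.map_cons, List.length_cons, List.replicate_succ]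
    rw [h x (by simp), ih (fun y hy => h y (by simp [hy]))]

-- the running-count step
lemma pvCnt_succ (signs : List String) (j : Nat) :
    pvCnt signs (j + 1) = pvCnt signs j + (if pvP signs j then 1 else 0) := by
  unfold pvCnt
  have hcast : ((j + 1 : Nat) : Int) = (j : Int) + 1 := by push_cast; ring
  rw [hcast, PySem.List.pyRange_one_succ_right (by omega), List.filter_append]
  by_cases h : pvP signs (j : Int) <;> simp [h]

-- B's per-row block equals the indicator row over the full q, once k = q.length
lemma pvRow (signs : List String) (m r : Nat) (hr : r < m) :
    ((PySem.List.pyRange 0 (m : Int) 1).filter (pvP signs)).map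
        (fun i => if i = (r : Int) then (1 : Int) else 0)
      = (if pvP signs r then
          List.replicate (pvCnt signs r) 0 ++ (1 : Int) ::
            List.replicate (pvCnt signs m - pvCnt signs r - 1) 0
         else List.replicate (pvCnt signs m) 0) := by
  have h1 : PySem.List.pyRange 0 (m : Int) 1
      = PySem.List.pyRange 0 (r : Int) 1 ++ PySem.List.pyRange (r : Int) (m : Int) 1 :=
    PySem.List.pyRange_one_append 0 (r : Int) (m : Int) (by omega) (by exact_mod_cast hr.le)
  have h2 : PySem.List.pyRange (r : Int) (m : Int) 1
      = PySem.List.pyRange (r : Int) ((r : Int) + 1) 1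
        ++ PySem.List.pyRange ((r : Int) + 1) (m : Int) 1 :=
    PySem.List.pyRange_one_append (r : Int) ((r : Int) + 1) (m : Int) (by omega) (by exact_mod_cast hr)
  have hmid : PySem.List.pyRange (r : Int) ((r : Int) + 1) 1 = [(r : Int)] :=
    PySem.List.pyRange_one_singleton _
  have hq : (PySem.List.pyRange 0 (m : Int) 1).filter (pvP signs)
      = (PySem.List.pyRange 0 (r : Int) 1).filter (pvP signs)
        ++ (if pvP signs r then [(r : Int)] else [])
        ++ (PySem.List.pyRange ((r : Int) + 1) (m : Int) 1).filter (pvP signs) := by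
    rw [h1, h2, hmid, List.filter_append, List.filter_append]
    by_cases h : pvP signs (r : Int) <;> simp [h]
  set qlt := (PySem.List.pyRange 0 (r : Int) 1).filter (pvP signs) with hqlt
  set qgt := (PySem.List.pyRange ((r : Int) + 1) (m : Int) 1).filter (pvP signs) with hqgt
  have hltz : qlt.map (fun i => if i = (r : Int) then (1 : Int) else 0)
      = List.replicate qlt.length 0 := by
    apply pvMapZero
    intro x hx
    have : x ∈ PySem.List.pyRange 0 (r : Int) 1 := List.mem_of_mem_filter hx
    rw [PySem.List.mem_pyRange_one] at this
    simp only [ite_eq_right_iff]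
    intro hxr; omega
  have hgtz : qgt.map (fun i => if i = (r : Int) then (1 : Int) else 0)
      = List.replicate qgt.length 0 := by
    apply pvMapZero
    intro x hx
    have : x ∈ PySem.List.pyRange ((r : Int) + 1) (m : Int) 1 := List.mem_of_mem_filter hx
    rw [PySem.List.mem_pyRange_one] at this
    simp only [ite_eq_right_iff]
    intro hxr; omega
  have hcntr : pvCnt signs r = qlt.length := rfl
  have hcntm : pvCnt signs m
      = qlt.length + (if pvP signs r then 1 else 0) + qgt.length := by
    unfold pvCnt
    rw [hq]
    by_cases h : pvP signs (r : Int) <;> (simp [h]; try omega)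
  rw [hq]
  by_cases h : pvP signs (r : Int)
  · simp only [h, if_true] at hcntm ⊢
    rw [List.map_append, List.map_append, hltz, hgtz, hcntr]
    have h3 : pvCnt signs m - qlt.length - 1 = qgt.length := by omega
    rw [h3]
    simp
  · simp only [h] at hcntm ⊢
    simp only [if_false, Bool.false_eq_true] at hcntm ⊢
    have h4 : pvCnt signs m = qlt.length + qgt.length := by omega
    rw [List.map_append, List.map_append, hltz, hgtz, h4, List.replicate_add]
    simp

-- B's loop invariant: after the first j rows, the state is the closed form
lemma pvInvB (A : List (List Int)) (signs : List String) (k : Int)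
    (hm : A.length ≤ signs.length) (j : Nat) (hj : j ≤ A.length) :
    ((List.zip A signs).take j).foldl (pvStepB k) (([] : List (List Int)), (0 : Int))
      = ((PySem.List.pyRange 0 (j : Int) 1).map (fun r =>
            PySem.List.pyGetD A r [] ++
              (if pvP signs r then
                List.replicate (pvCnt signs r.toNat) 0 ++ (1 : Int) ::
                  List.replicate (k - (pvCnt signs r.toNat : Int) - 1).toNat 0
               else List.replicate k.toNat 0)),
         (pvCnt signs j : Int)) := by
  induction j with
  | zero =>
    simp [pvCnt, PySem.List.pyRange_one_eq_nil (le_refl (0 : Int))]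
  | succ j ih =>
    have hj' : j ≤ A.length := by omega
    have hjlt : j < A.length := by omega
    have hjs : j < signs.length := by omega
    have hjz : j < (List.zip A signs).length := by
      rw [List.length_zip]; omega
    have htake : (List.zip A signs).take (j + 1)
        = (List.zip A signs).take j ++ [(A[j]'hjlt, signs[j]'hjs)] := by
      rw [List.take_succ]
      congr 1
      rw [List.getElem?_eq_getElem hjz]
      simp [List.getElem_zip]
    rw [htake, List.foldl_append, ih hj', List.foldl_cons, List.foldl_nil]
    have hget : PySem.List.pyGetD signs ((j : Nat) : Int) "" = signs[j]'hjs := by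
      rw [PySem.List.pyGetD_eq_getElem signs "" (by omega) (by exact_mod_cast hjs)]
      simp
    have hgetA : PySem.List.pyGetD A ((j : Nat) : Int) ([] : List Int) = A[j]'hjlt := by
      rw [PySem.List.pyGetD_eq_getElem A ([] : List Int) (by omega) (by exact_mod_cast hjlt)]
      simp
    have hcast : ((j + 1 : Nat) : Int) = (j : Int) + 1 := by push_cast; ring
    by_cases h : signs[j]'hjs = ">=" ∨ signs[j]'hjs = "="
    · have hb : pvP signs (j : Int) = true := by
        unfold pvP; rw [hget]; exact decide_eq_true h
      rw [pvStepB, if_pos (by simpa using h)]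
      rw [pvCnt_succ]
      simp only [hb, if_true]
      simp only [Prod.mk.injEq]
      refine ⟨?_, by push_cast; ring⟩
      rw [hcast, PySem.List.pyRange_one_succ_right (by omega), List.map_append]
      congr 1
      simp [hb, hget, hgetA]
    · have hb : pvP signs (j : Int) = false := by
        unfold pvP; rw [hget]; exact decide_eq_false h
      rw [pvStepB, if_neg (by simpa using h)]
      rw [pvCnt_succ]
      simp only [hb, Bool.false_eq_true, if_false]
      simp only [Prod.mk.injEq]
      refine ⟨?_, by simp⟩
      rw [hcast, PySem.List.pyRange_one_succ_right (by omega), List.map_append]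
      congr 1
      simp [hb, hget, hgetA]

-- the up-front count k equals the number of qualifying rows
lemma pvCount_foldl (l : List String) (c : Int) :
    l.foldl (fun acc s => if s = ">=" ∨ s = "=" then acc + 1 else acc) c
      = c + (l.countP (fun s => decide (s = ">=" ∨ s = "="))) := by
  induction l generalizing c with
  | nil => simp
  | cons x xs ih =>
    rw [List.foldl_cons, ih, List.countP_cons]
    by_cases h : x = ">=" ∨ x = "=" <;> simp [h] <;> push_cast <;> ring

lemma pvCnt_eq_countP (signs : List String) (m : Nat) (hm : m ≤ signs.length) :
    pvCnt signs m = (signs.take m).countP (fun s => decide (s = ">=" ∨ s = "=")) := by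
  induction m with
  | zero => simp [pvCnt, PySem.List.pyRange_one_eq_nil (le_refl (0 : Int))]
  | succ m ih =>
    have hm' : m ≤ signs.length := by omega
    have hmlt : m < signs.length := by omega
    rw [pvCnt_succ, ih hm', List.take_succ, List.getElem?_eq_getElem hmlt]
    simp only [Option.toList_some, List.countP_append, List.countP_cons, List.countP_nil]
    have : pvP signs (m : Int)
        = decide (signs[m]'hmlt = ">=" ∨ signs[m]'hmlt = "=") := by
      unfold pvP
      rw [PySem.List.pyGetD_eq_getElem signs "" (by omega) (by exact_mod_cast hmlt)]
      simp
    by_cases h : signs[m]'hmlt = ">=" ∨ signs[m]'hmlt = "=" <;>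
      simp [this, h]

-- ===== VERDICT (by name: the statement is the Claim_ definition above) =====
theorem add_artificial_vars_spec : Claim_equal_add_artificial_vars := by
  intro A b signs var_names basis _ hpre
  obtain ⟨-, hm⟩ := hpre
  unfold Spec_add_artificial_vars
  simp only [add_artificial_vars, add_artificial_vars_alt]
  rw [pvInv A signs var_names basis A.length]
  -- identify B's up-front k with the number of qualifying rows
  have hk : (PySem.List.slice signs none (some (A.length : Int))).foldl
      (fun acc s => if s = ">=" ∨ s = "=" then acc + 1 else acc) (0 : Int)
      = (pvCnt signs A.length : Int) := by
    rw [PySem.List.slice_to_natCast, pvCount_foldl, pvCnt_eq_countP signs A.length hm]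
    simp
  rw [hk]
  -- B's fold runs over the whole zip
  have hzlen : (List.zip A signs).length = A.length := by
    rw [List.length_zip]; omega
  have hfull : (List.zip A signs) = (List.zip A signs).take A.length := by
    rw [← hzlen, List.take_length]
  rw [hfull, pvInvB A signs (pvCnt signs A.length : Int) hm A.length (le_refl _)]
  unfold pvState
  simp only [Prod.mk.injEq]
  set q := (PySem.List.pyRange 0 (A.length : Int) 1).filter (pvP signs) with hqdef
  have hqlen : q.length = pvCnt signs A.length := rfl
  refine ⟨?_, trivial, ?_, ?_, ?_⟩
  · -- matrix component: rows agree pointwise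
    apply List.map_congr_left
    intro r hrmem
    rw [PySem.List.mem_pyRange_one] at hrmem
    obtain ⟨hr0, hrm⟩ := hrmem
    obtain ⟨n, rfl⟩ : ∃ nn : Nat, r = (nn : Int) := ⟨r.toNat, by omega⟩
    have hrlt : n < A.length := by exact_mod_cast hrm
    congr 1
    rw [pvRow signs A.length n hrlt]
    simp only [Int.toNat_natCast, ← hqlen]
    by_cases h : pvP signs (n : Int)
    · simp only [if_pos h]
      have harg : q.length - pvCnt signs n - 1
          = ((q.length : Int) - (pvCnt signs n : Int) - 1).toNat := by omega
      rw [harg]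
    · simp [h, ← hqlen]
  · -- var_names component
    rw [hqlen]
  · -- basis component
    rw [hqlen]
  · -- artificial_vars component
    rw [hqlen, PySem.List.pyRange_one, PySem.List.pyRange_one]
    have : ((var_names.length : Int) + (pvCnt signs A.length : Int) - (var_names.length : Int)).toNat
        = ((pvCnt signs A.length : Int) - 0).toNat := by omega
    rw [this]
    simp
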